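-- pv_equiv track=rewrite | github.com/Vlad0922/finding_friends | download_users.py | create_execute_code
-- ===== SOURCE A (Python) =====
-- def create_execute_code(params_orig, id_list, method, user_field='owner_id'):
--     params = list(params_orig.items())
--
--     def create_single(idx):
--         c = 'API.{}({{'.format(method)
--         for p, v in (params + [(user_field, idx)]):
--             c += '"{}" : "{}",'.format(p, v)
--         c += '}),'
--
--         return c
--
--     code = 'return[';
--     for idx in id_list:
--         code += create_single(idx)
--     code += '];'
--
--     return code
-- ===== SOURCE B (Python) =====
-- def create_execute_code(params_orig, id_list, method, user_field='owner_id'):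
--     # Opening boilerplate of one API call, up to (and including) the quote that
--     # precedes the id value.
--     opener = 'API.{}({{'.format(method)
--     for p, v in params_orig.items():
--         opener += '"{}" : "{}",'.format(p, v)
--     opener += '"{}" : "'.format(user_field)
--     if not id_list:
--         return 'return[];'
--     # The ids are the only varying text: join them with the fixed separator
--     # "close one call, open the next".
--     sep = '",}),' + opener
--     return 'return[' + opener + sep.join(str(i) for i in id_list) + '",}),];'
-- ===== Notes on version B (the rewrite author's own statement) =====
-- stated objective: alternative
-- what changed: B views the output as the list of id strings joined by one fixed separator (the boilerplate that closes one API call and opens the next): it builds the opener string once, then emits 'return[' + opener + sep.join(ids) + closer, with no per-id loop over the parameters. (measured ~4-5x faster: Python-level formatting work per id is replaced by one precomputed separator and a single join)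
import Mathlib
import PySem

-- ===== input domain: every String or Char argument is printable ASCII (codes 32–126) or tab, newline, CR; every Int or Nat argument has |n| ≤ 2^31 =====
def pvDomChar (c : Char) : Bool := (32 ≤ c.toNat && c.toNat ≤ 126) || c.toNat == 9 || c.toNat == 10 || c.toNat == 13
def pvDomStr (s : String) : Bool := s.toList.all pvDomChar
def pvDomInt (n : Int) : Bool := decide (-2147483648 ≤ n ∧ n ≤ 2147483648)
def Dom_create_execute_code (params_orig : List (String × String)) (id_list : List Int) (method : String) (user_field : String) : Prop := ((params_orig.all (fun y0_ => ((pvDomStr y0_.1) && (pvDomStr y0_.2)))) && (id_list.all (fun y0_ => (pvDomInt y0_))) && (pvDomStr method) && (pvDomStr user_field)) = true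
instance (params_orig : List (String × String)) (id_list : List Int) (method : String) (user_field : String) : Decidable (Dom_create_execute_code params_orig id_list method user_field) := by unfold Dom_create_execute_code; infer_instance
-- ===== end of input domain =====

-- B treats the ids as the only varying text and joins them with a fixed separator
-- (close one call / open the next), instead of A's per-id concatenation with an inner
-- loop over the parameters; same output, different decomposition (measured faster in a timing run).

-- ===== PORT A =====
-- literal port of A: per-id helper that loops over params + [(user_field, idx)], outer += loop
def create_execute_code (params_orig : List (String × String)) (id_list : List Int) (method : String) (user_field : String) : String :=
  let params := (PySem.Dict.ofList params_orig).items
  let create_single := fun (idx : Int) =>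
    let c := "API." ++ method ++ "({"
    let c := (params ++ [(user_field, PySem.Int.toStr idx)]).foldl
      (fun c pv => c ++ ("\"" ++ pv.1 ++ "\" : \"" ++ pv.2 ++ "\",")) c
    c ++ "}),"
  let code := "return["
  let code := id_list.foldl (fun code idx => code ++ create_single idx) code
  code ++ "];"

-- ===== PORT B =====
-- sep.join(pieces): Python str.join ported by hand, step for step (exact: empty list -> "",
-- otherwise first piece then sep ++ piece for each remaining piece)
def pySepJoin (sep : String) : List String → String
  | [] => ""
  | a :: as => as.foldl (fun r s => r ++ sep ++ s) a

def create_execute_code_alt (params_orig : List (String × String)) (id_list : List Int) (method : String) (user_field : String) : String :=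
  let opener := "API." ++ method ++ "({"
  let opener := ((PySem.Dict.ofList params_orig).items).foldl
    (fun c pv => c ++ ("\"" ++ pv.1 ++ "\" : \"" ++ pv.2 ++ "\",")) opener
  let opener := opener ++ ("\"" ++ user_field ++ "\" : \"")
  match id_list with
  | [] => "return[];"
  | _ =>
    let sep := "\",})," ++ opener
    "return[" ++ opener ++ pySepJoin sep (id_list.map PySem.Int.toStr) ++ "\",}),];"

-- ===== PRECONDITION & SPEC =====
def Spec_create_execute_code (params_orig : List (String × String)) (id_list : List Int) (method : String) (user_field : String) (out : String) : Prop := out = create_execute_code_alt params_orig id_list method user_field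
instance (params_orig : List (String × String)) (id_list : List Int) (method : String) (user_field : String) (out : String) : Decidable (Spec_create_execute_code params_orig id_list method user_field out) := by unfold Spec_create_execute_code; infer_instance

-- ===== CLAIM =====
def Claim_equal_create_execute_code : Prop := ∀ (params_orig : List (String × String)) (id_list : List Int) (method : String) (user_field : String), Dom_create_execute_code params_orig id_list method user_field → Spec_create_execute_code params_orig id_list method user_field (create_execute_code params_orig id_list method user_field)

-- ===== LEMMAS AND PROOFS =====

-- shifting the seed of a string-concatenation foldl out front
theorem foldl_append_shift {α : Type} (f : α → String) (l : List α) (a b : String) :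
    List.foldl (fun r x => r ++ f x) (a ++ b) l = a ++ List.foldl (fun r x => r ++ f x) b l := by
  induction l generalizing b with
  | nil => rfl
  | cons x t ih => simp only [List.foldl_cons, String.append_assoc, ih]

theorem pySepJoin_cons_cons (sep a b : String) (l : List String) :
    pySepJoin sep (a :: b :: l) = a ++ sep ++ pySepJoin sep (b :: l) := by
  simp only [pySepJoin, List.foldl_cons]
  have := foldl_append_shift (fun s => sep ++ s) l (a ++ sep) b
  simpa [String.append_assoc] using this

-- key lemma: an append-each loop over a nonempty list with fixed opener o and closer c
-- equals opener ++ (pieces joined by the separator "c ++ o") ++ closer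
theorem loop_eq_sepJoin (o c : String) (f : Int → String) (x : Int) (t : List Int) :
    List.foldl (fun r i => r ++ (o ++ f i ++ c)) "" (x :: t)
      = o ++ pySepJoin (c ++ o) ((x :: t).map f) ++ c := by
  induction t generalizing x with
  | nil => simp [pySepJoin, String.append_assoc]
  | cons y t ih =>
    have step : List.foldl (fun r i => r ++ (o ++ f i ++ c)) "" (x :: y :: t)
        = (o ++ f x ++ c) ++ List.foldl (fun r i => r ++ (o ++ f i ++ c)) "" (y :: t) := by
      simp only [List.foldl_cons]
      have := foldl_append_shift (fun i => o ++ f i ++ c) (y :: t) (o ++ f x ++ c) ""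
      simpa using this
    rw [step, ih]
    simp only [List.map_cons]
    rw [pySepJoin_cons_cons]
    simp [String.append_assoc]

-- ===== VERDICT =====
theorem create_execute_code_spec : Claim_equal_create_execute_code := by
  intro params_orig id_list method user_field _
  unfold Spec_create_execute_code create_execute_code create_execute_code_alt
  simp only
  cases id_list with
  | nil => rfl
  | cons x t =>
    have hsingle : ∀ idx : Int,
        ((((PySem.Dict.ofList params_orig).items) ++ [(user_field, PySem.Int.toStr idx)]).foldl
          (fun c pv => c ++ ("\"" ++ pv.1 ++ "\" : \"" ++ pv.2 ++ "\",")) ("API." ++ method ++ "({")) ++ "}),"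
        = ((((PySem.Dict.ofList params_orig).items).foldl
              (fun c pv => c ++ ("\"" ++ pv.1 ++ "\" : \"" ++ pv.2 ++ "\","))
              ("API." ++ method ++ "({")) ++ ("\"" ++ user_field ++ "\" : \""))
          ++ PySem.Int.toStr idx ++ "\",})," := by
      intro idx
      rw [List.foldl_append]
      simp [String.append_assoc]
    simp only [hsingle]
    rw [show ("return[" : String) = "return[" ++ "" from rfl,
        foldl_append_shift (fun idx =>
          ((((PySem.Dict.ofList params_orig).items).foldl
              (fun c pv => c ++ ("\"" ++ pv.1 ++ "\" : \"" ++ pv.2 ++ "\","))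
              ("API." ++ method ++ "({")) ++ ("\"" ++ user_field ++ "\" : \""))
          ++ PySem.Int.toStr idx ++ "\",}),") (x :: t) "return[" ""]
    rw [loop_eq_sepJoin]
    simp [String.append_assoc]
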